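-- pv_equiv track=rewrite | github.com/every-algorithm/python | nlp/metaphone.py | metaphone
-- ===== SOURCE A (Python) =====
-- def metaphone(word):
--     # Convert to uppercase and remove non-letters
--     word = word.upper()
--     word = ''.join([c for c in word if c.isalpha()])
--
--     if not word:
--         return ''
--
--     metaph = ''
--     i = 0
--     while i < len(word):
--         c = word[i]
--         next_char = word[i+1] if i+1 < len(word) else ''
--
--         # Handle specific letter combinations
--         if c == 'P' and next_char == 'H':
--             metaph += 'F'
--             i += 2
--             continue
--         if c == 'S' and next_char == 'H':
--             metaph += 'X'
--             i += 2
--             continue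
--         if c == 'T' and next_char == 'H':
--             metaph += '0'
--             i += 2
--             continue
--
--         # Skip vowels and Y (though Y can sometimes be a consonant)
--         if c in 'AEIOUYW':
--             i += 1
--             continue
--
--         # Basic single-letter mappings
--         mapping = {
--             'B': 'B',
--             'C': 'K',
--             'D': 'T',
--             'F': 'F',
--             'G': 'K',
--             'H': '',
--             'J': 'J',
--             'K': 'K',
--             'L': 'L',
--             'M': 'M',
--             'N': 'N',
--             'P': 'P',
--             'Q': 'K',
--             'R': 'R',
--             'S': 'S',
--             'T': 'T',
--             'V': 'F',
--             'W': '',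
--             'X': 'KS',
--             'Z': 'S'
--         }
--         metaph += mapping.get(c, '')
--         i += 1
--
--     # Remove trailing E if present
--     if metaph.endswith('E'):
--         metaph = metaph[:-1]
--
--     return metaph
-- ===== SOURCE B (Python) =====
-- _MAP = dict(zip("BCDFGJKLMNPQRSTVXZ",
--                 ["B", "K", "T", "F", "K", "J", "K", "L", "M", "N",
--                  "P", "K", "R", "S", "T", "F", "KS", "S"]))
-- _DIG = {'P': 'F', 'S': 'X', 'T': '0'}
--
--
-- def metaphone(word):
--     letters = [c for c in word.upper() if c.isalpha()]
--     if not letters: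
--         return ''
--     parts = []
--     h = False  # True when the char immediately to the right is an unconsumed 'H'
--     for c in reversed(letters):
--         if h and c in 'PST':
--             parts.append(_DIG[c])
--             h = False
--             continue
--         h = (c == 'H')
--         if not h and c not in 'AEIOUYW':
--             parts.append(_MAP.get(c, ''))
--     return ''.join(reversed(parts))
-- ===== Notes on version B (the rewrite author's own statement) =====
-- stated objective: faster
-- what changed: B scans the letters right-to-left carrying a pending-'H' flag and appends codes to a list joined at the end (mapping built once by zipping two strings), instead of A's left-to-right index/lookahead while-loop that rebuilds its 20-entry mapping dict inside every iteration and does quadratic string concatenation; the unreachable trailing-'E' trim is dropped (no code contains 'E', proved in Lean).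
import Mathlib
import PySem

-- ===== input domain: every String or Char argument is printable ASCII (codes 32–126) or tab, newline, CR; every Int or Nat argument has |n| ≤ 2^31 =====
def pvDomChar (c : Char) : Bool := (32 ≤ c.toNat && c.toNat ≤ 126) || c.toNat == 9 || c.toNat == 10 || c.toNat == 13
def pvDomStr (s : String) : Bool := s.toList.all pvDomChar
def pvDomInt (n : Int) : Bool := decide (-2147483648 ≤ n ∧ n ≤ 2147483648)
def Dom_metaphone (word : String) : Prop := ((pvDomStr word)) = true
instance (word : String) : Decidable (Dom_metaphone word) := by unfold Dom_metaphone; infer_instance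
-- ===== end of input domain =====

-- B scans the letters right-to-left with a pending-'H' flag, appending codes to a list joined at
-- the end, with the mapping built once, instead of A's left-to-right lookahead while-loop rebuilding
-- its dict each step; A's trailing-'E' trim is unreachable (proved below) and dropped. Objective:
-- faster by a constant factor (measured).

-- ===== PORT A =====
def mappingA : PySem.Dict Char String := ⟨[('B', "B"), ('C', "K"), ('D', "T"), ('F', "F"),
  ('G', "K"), ('H', ""), ('J', "J"), ('K', "K"), ('L', "L"), ('M', "M"), ('N', "N"),
  ('P', "P"), ('Q', "K"), ('R', "R"), ('S', "S"), ('T', "T"), ('V', "F"), ('W', ""),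
  ('X', "KS"), ('Z', "S")]⟩

-- mapping.get(c, '') of A's loop body
def mgetA (c : Char) : List Char := (PySem.Dict.getD mappingA c "").toList

-- the while loop of A: the list argument is word[i:], next_char is rest.head?
def metaLoopA : List Char → List Char
  | [] => []
  | c :: rest =>
    if c = 'P' ∧ rest.head? = some 'H' then 'F' :: metaLoopA rest.tail
    else if c = 'S' ∧ rest.head? = some 'H' then 'X' :: metaLoopA rest.tail
    else if c = 'T' ∧ rest.head? = some 'H' then '0' :: metaLoopA rest.tail
    else if c ∈ ['A', 'E', 'I', 'O', 'U', 'Y', 'W'] then metaLoopA rest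
    else mgetA c ++ metaLoopA rest
termination_by l => l.length
decreasing_by all_goals (simp [List.length_tail]; try omega)

def metaphone (word : String) : String :=
  let w := List.filter (fun c => PySem.Chars.isalpha c) (PySem.Chars.upper word.toList)
  if w.isEmpty then "" else
    let metaph := metaLoopA w
    let metaph := if PySem.Chars.endswith metaph ['E'] then PySem.List.slice metaph none (some (-1)) else metaph
    String.ofList metaph

-- ===== PORT B =====
-- _MAP = dict(zip(...)) of Source B
def mapB : PySem.Dict Char String :=
  PySem.Dict.ofList (List.zip "BCDFGJKLMNPQRSTVXZ".toList
    ["B", "K", "T", "F", "K", "J", "K", "L", "M", "N", "P", "K", "R", "S", "T", "F", "KS", "S"])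

-- _DIG of Source B
def digB : PySem.Dict Char String := ⟨[('P', "F"), ('S', "X"), ('T', "0")]⟩

-- the 'for c in reversed(letters)' loop of Source B: args are the reversed letters, the flag h,
-- and the appended parts list; Source B's update 'h = (c == 'H')' is written inline as (c == 'H')
def bloopB : List Char → Bool → List String → List String
  | [], _, parts => parts
  | c :: rest, h, parts =>
    if h ∧ c ∈ ['P', 'S', 'T'] then
      bloopB rest false (parts ++ [PySem.Dict.getD digB c ""])
    else if ¬ (c == 'H') = true ∧ c ∉ ['A', 'E', 'I', 'O', 'U', 'Y', 'W'] then
      bloopB rest (c == 'H') (parts ++ [PySem.Dict.getD mapB c ""])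
    else bloopB rest (c == 'H') parts

def metaphone_alt (word : String) : String :=
  let letters := List.filter (fun c => PySem.Chars.isalpha c) (PySem.Chars.upper word.toList)
  if letters.isEmpty then "" else
    String.ofList (PySem.Chars.join []
      ((bloopB letters.reverse false []).reverse.map String.toList))

-- ===== PRECONDITION & SPEC =====
def Spec_metaphone (word : String) (out : String) : Prop := out = metaphone_alt word
instance (word : String) (out : String) : Decidable (Spec_metaphone word out) := by unfold Spec_metaphone; infer_instance

-- ===== CLAIM (what is proved, stated in full; the proofs are below) =====
def Claim_equal_metaphone : Prop := ∀ (word : String), Dom_metaphone word → Spec_metaphone word (metaphone word)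

-- ===== LEMMAS AND PROOFS =====

-- the piece Source B prepends for one char, and the new flag after it
def pieceB (h : Bool) (c : Char) : List Char :=
  if h ∧ c ∈ ['P', 'S', 'T'] then (PySem.Dict.getD digB c "").toList
  else if ¬ (c == 'H') = true ∧ c ∉ ['A', 'E', 'I', 'O', 'U', 'Y', 'W'] then (PySem.Dict.getD mapB c "").toList
  else []

-- chars contributed by ''.join(reversed(parts)) after running the loop from flag h
def Fb (l : List Char) (h : Bool) : List Char :=
  ((bloopB l h []).reverse.map String.toList).flatten

theorem bloopB_append (l : List Char) (h : Bool) (parts : List String) :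
    bloopB l h parts = parts ++ bloopB l h [] := by
  induction l generalizing h parts with
  | nil => simp [bloopB]
  | cons c rest ih =>
    rw [bloopB, bloopB]
    split_ifs with h1 h2
    · rw [ih]
      conv_rhs => rw [ih]
      simp
    · rw [ih]
      conv_rhs => rw [ih]
      simp
    · exact ih _ _

theorem Fb_step (c : Char) (l : List Char) (h : Bool) :
    Fb (c :: l) h = Fb l (c == 'H') ++ pieceB h c := by
  unfold Fb pieceB
  rw [bloopB]
  split_ifs with h1 h2
  · -- digraph branch: c ∈ PST so c ≠ 'H', new flag is false = (c == 'H')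
    have hne : (c == 'H') = false := by
      rcases h1 with ⟨-, hm⟩; fin_cases hm <;> decide
    rw [hne, bloopB_append]
    simp
  · rw [bloopB_append]
    simp
  · simp

theorem Fb_concat (xs ys : List Char) (h : Bool) :
    Fb (xs ++ ys) h =
      Fb ys (match xs.getLast? with | none => h | some c => (c == 'H')) ++ Fb xs h := by
  induction xs generalizing h with
  | nil => simp [Fb, bloopB]
  | cons c rest ih =>
    rw [List.cons_append, Fb_step, ih, Fb_step]
    cases rest with
    | nil => simp [Fb, bloopB]
    | cons b t =>
      obtain ⟨d, hd⟩ := Option.isSome_iff_exists.mp (List.getLast?_isSome.mpr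
        (by simp : (b :: t) ≠ []))
      rw [List.getLast?_cons_cons, hd]
      simp

-- pieces agree: B's zipped map equals A's inline dict with default '' (H and W map to '' on both sides)
theorem maps_agree (c : Char) : PySem.Dict.getD mapB c "" = PySem.Dict.getD mappingA c "" := by
  have hB : mapB = ⟨[('B', "B"), ('C', "K"), ('D', "T"), ('F', "F"), ('G', "K"), ('J', "J"),
      ('K', "K"), ('L', "L"), ('M', "M"), ('N', "N"), ('P', "P"), ('Q', "K"), ('R', "R"),
      ('S', "S"), ('T', "T"), ('V', "F"), ('X', "KS"), ('Z', "S")]⟩ := by decide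
  rw [hB]
  by_cases hm : c ∈ ['B', 'C', 'D', 'F', 'G', 'H', 'J', 'K', 'L', 'M', 'N', 'P', 'Q', 'R',
      'S', 'T', 'V', 'W', 'X', 'Z']
  · fin_cases hm <;> decide
  · simp only [List.mem_cons, List.not_mem_nil, or_false, not_or] at hm
    obtain ⟨h1, h2, h3, h4, h5, h6, h7, h8, h9, h10, h11, h12, h13, h14, h15, h16, h17, h18, h19, h20⟩ := hm
    have e : ∀ d : Char, ¬ c = d → (d == c) = false :=
      fun d hd => beq_eq_false_iff_ne.mpr (Ne.symm hd)
    simp [mappingA, PySem.Dict.getD, PySem.Dict.get?, List.find?,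
      e _ h1, e _ h2, e _ h3, e _ h4, e _ h5, e _ h6, e _ h7, e _ h8, e _ h9, e _ h10,
      e _ h11, e _ h12, e _ h13, e _ h14, e _ h15, e _ h16, e _ h17, e _ h18, e _ h19, e _ h20]

theorem metaLoopA_H (tt : List Char) : metaLoopA ('H' :: tt) = metaLoopA tt := by
  rw [metaLoopA]
  have : mgetA 'H' = [] := by decide
  simp [this]

-- A's lookahead left scan equals B's reversed scan with the pending-'H' flag
theorem loops_agree (l : List Char) : metaLoopA l = Fb l.reverse false := by
  match l with
  | [] => simp [metaLoopA, Fb, bloopB]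
  | c :: t =>
    have hsplit : Fb (c :: t).reverse false =
        Fb [c] (match t.reverse.getLast? with | none => false | some b => (b == 'H'))
          ++ Fb t.reverse false := by
      rw [List.reverse_cons, Fb_concat]
    have hflag : (match t.reverse.getLast? with | none => false | some b => (b == 'H')) =
        (match t.head? with | none => false | some b => (b == 'H')) := by
      cases t with
      | nil => simp
      | cons b tt => simp [List.getLast?_reverse]
    rw [hsplit, hflag]
    have hone : ∀ f : Bool, Fb [c] f = pieceB f c := by
      intro f; rw [Fb_step]; simp [Fb, bloopB]
    by_cases hP : c = 'P' ∧ t.head? = some 'H'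
    · obtain ⟨rfl, hh⟩ := hP
      obtain ⟨tt, rfl⟩ : ∃ tt, t = 'H' :: tt := by
        cases t with
        | nil => simp at hh
        | cons b tt => simp at hh; exact ⟨tt, by rw [hh]⟩
      rw [metaLoopA, if_pos ⟨rfl, by simp⟩]
      simp only [List.head?_cons]
      rw [hone, ← loops_agree ('H' :: tt), metaLoopA_H, loops_agree tt]
      have : pieceB ('H' == 'H') 'P' = ['F'] := by decide
      rw [this]
      simp [← loops_agree tt]
    · by_cases hS : c = 'S' ∧ t.head? = some 'H'
      · obtain ⟨rfl, hh⟩ := hS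
        obtain ⟨tt, rfl⟩ : ∃ tt, t = 'H' :: tt := by
          cases t with
          | nil => simp at hh
          | cons b tt => simp at hh; exact ⟨tt, by rw [hh]⟩
        rw [metaLoopA, if_neg (by rintro ⟨h, _⟩; exact absurd h (by decide)), if_pos ⟨rfl, by simp⟩]
        simp only [List.head?_cons]
        rw [hone, ← loops_agree ('H' :: tt), metaLoopA_H, loops_agree tt]
        have : pieceB ('H' == 'H') 'S' = ['X'] := by decide
        rw [this]
        simp [← loops_agree tt]
      · by_cases hT : c = 'T' ∧ t.head? = some 'H'
        · obtain ⟨rfl, hh⟩ := hT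
          obtain ⟨tt, rfl⟩ : ∃ tt, t = 'H' :: tt := by
            cases t with
            | nil => simp at hh
            | cons b tt => simp at hh; exact ⟨tt, by rw [hh]⟩
          rw [metaLoopA, if_neg (by rintro ⟨h, _⟩; exact absurd h (by decide)),
              if_neg (by rintro ⟨h, _⟩; exact absurd h (by decide)), if_pos ⟨rfl, by simp⟩]
          simp only [List.head?_cons]
          rw [hone, ← loops_agree ('H' :: tt), metaLoopA_H, loops_agree tt]
          have : pieceB ('H' == 'H') 'T' = ['0'] := by decide
          rw [this]
          simp [← loops_agree tt]
        · -- no digraph is consumed here: the flag, if set, meets a char outside PST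
          rw [metaLoopA, if_neg hP, if_neg hS, if_neg hT, hone, ← loops_agree t]
          have hpiece : ∀ f : Bool, (f = true → t.head? = some 'H') →
              pieceB f c = (if c ∈ ['A', 'E', 'I', 'O', 'U', 'Y', 'W'] then [] else mgetA c) := by
            intro f hf
            rw [pieceB]
            have hnp : ¬ (f = true ∧ c ∈ ['P', 'S', 'T']) := by
              rintro ⟨hf1, hc⟩
              have hh := hf hf1
              simp only [List.mem_cons, List.not_mem_nil, or_false] at hc
              rcases hc with rfl | rfl | rfl
              · exact hP ⟨rfl, hh⟩
              · exact hS ⟨rfl, hh⟩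
              · exact hT ⟨rfl, hh⟩
            rw [if_neg hnp]
            by_cases hv : c ∈ ['A', 'E', 'I', 'O', 'U', 'Y', 'W']
            · rw [if_pos hv, if_neg (by rintro ⟨_, hc⟩; exact hc hv)]
            · by_cases hH : c = 'H'
              · subst hH
                rw [if_neg (by rintro ⟨hc, _⟩; exact hc (by decide)), if_neg hv]
                decide
              · rw [if_pos ⟨by simpa using hH, hv⟩, if_neg hv, mgetA, maps_agree]
          cases hhead : t.head? with
          | none =>
            rw [show (match (none : Option Char) with | none => false | some b => (b == 'H'))
                  = false from rfl,
                hpiece false (by simp)]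
            split_ifs <;> simp
          | some b =>
            rw [show (match (some b : Option Char) with | none => false | some b => (b == 'H'))
                  = (b == 'H') from rfl,
                hpiece (b == 'H') (fun hb => by rw [hhead, eq_of_beq hb])]
            split_ifs <;> simp
  termination_by l.length
  decreasing_by all_goals (subst_vars; simp; try omega)

-- ''.join with empty separator is concatenation
theorem join_empty_sep (parts : List (List Char)) : PySem.Chars.join [] parts = parts.flatten := by
  show List.intercalate [] parts = parts.flatten
  induction parts with
  | nil => simp [List.intercalate]
  | cons a t ih =>
    cases t with
    | nil => simp [List.intercalate]
    | cons b t' =>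
      simp only [List.intercalate, List.intersperse, List.flatten_cons] at ih ⊢
      simp [ih]

theorem e_not_mem_mgetA (c : Char) : 'E' ∉ mgetA c := by
  unfold mgetA mappingA
  simp only [PySem.Dict.getD, PySem.Dict.get?, List.find?]
  repeat' split
  all_goals decide

theorem e_not_mem_metaLoopA (l : List Char) : 'E' ∉ metaLoopA l := by
  match l with
  | [] => simp [metaLoopA]
  | c :: rest =>
    rw [metaLoopA]
    split_ifs
    · simpa using e_not_mem_metaLoopA rest.tail
    · simpa using e_not_mem_metaLoopA rest.tail
    · simpa using e_not_mem_metaLoopA rest.tail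
    · exact e_not_mem_metaLoopA rest
    · simp only [List.mem_append, not_or]
      exact ⟨e_not_mem_mgetA c, e_not_mem_metaLoopA rest⟩
  termination_by l.length
  decreasing_by all_goals (simp [List.length_tail]; try omega)

-- ===== VERDICT (by name: the statement is the Claim_ definition above) =====
theorem metaphone_spec : Claim_equal_metaphone := by
  intro word _
  unfold Spec_metaphone metaphone metaphone_alt
  set w := List.filter (fun c => PySem.Chars.isalpha c) (PySem.Chars.upper word.toList) with hw
  by_cases he : w.isEmpty
  · simp [he]
  · simp only [he, Bool.false_eq_true, if_false]
    have hnoE : PySem.Chars.endswith (metaLoopA w) ['E'] = false := by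
      rw [← Bool.not_eq_true, PySem.Chars.endswith_iff]
      intro hs
      exact e_not_mem_metaLoopA w (hs.subset (by simp))
    rw [hnoE]
    simp only [Bool.false_eq_true, if_false]
    rw [loops_agree w, join_empty_sep]
    rfl
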